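-- pv_equiv track=rewrite | github.com/ricktech01/stoichiometry-calculator | sigFigs.py | getWholeZ
-- ===== SOURCE A (Python) =====
-- def getWhole(sVal):
--     temp = ''
--     for i in sVal:
--         if i == '.':
--             break
--         else:
--             temp+= i
--     return temp
--
-- def getWholeZ(sVal):
--     temp = getWhole(sVal)[::-1]
--     out = ''
--     reached = False
--     for i in temp:
--         if i != '0':
--             reached = True
--         if not reached:
--             out += i
--     return out
-- ===== SOURCE B (Python) =====
-- def getWholeZ(sVal):
--     dot = sVal.find('.')
--     whole = sVal if dot == -1 else sVal[:dot]
--     stripped = whole.rstrip('0')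
--     return '0' * (len(whole) - len(stripped))
-- ===== Notes on version B (the rewrite author's own statement) =====
-- stated objective: faster
-- what changed: Replaces the character-by-character break loop, the string reversal, and the reached-flag accumulator loop with find/slice to take the integer part, a right-strip of trailing zeros, and length arithmetic building the result by repetition.
import Mathlib
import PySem

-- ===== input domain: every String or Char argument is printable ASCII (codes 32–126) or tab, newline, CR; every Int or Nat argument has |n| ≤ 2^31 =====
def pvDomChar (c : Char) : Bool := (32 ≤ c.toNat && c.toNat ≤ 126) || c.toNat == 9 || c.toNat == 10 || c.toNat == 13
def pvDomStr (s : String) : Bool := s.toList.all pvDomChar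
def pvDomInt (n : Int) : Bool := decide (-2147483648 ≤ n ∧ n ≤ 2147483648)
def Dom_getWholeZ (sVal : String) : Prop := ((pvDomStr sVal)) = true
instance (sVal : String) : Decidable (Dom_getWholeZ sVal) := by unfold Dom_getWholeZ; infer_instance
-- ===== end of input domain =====

-- B replaces A's reverse-and-collect loop with a reached flag by find/slice + right-strip + length arithmetic (objective: faster, constant-factor measured).

-- ===== PORT A =====
-- the loop of getWhole: append each character until the first '.' (break)
def getWholeGo : List Char → List Char
  | [] => []
  | c :: cs => if c == '.' then [] else c :: getWholeGo cs

def getWhole (sVal : String) : String := String.ofList (getWholeGo sVal.toList)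

-- the loop of getWholeZ over temp, with state (out, reached)
def zLoopA : List Char → List Char → Bool → List Char
  | [], out, _ => out
  | i :: rest, out, reached =>
    let reached' := if i != '0' then true else reached
    let out' := if !reached' then out ++ [i] else out
    zLoopA rest out' reached'

def getWholeZ (sVal : String) : String :=
  -- getWhole(sVal)[::-1] : [::-1] is exact reversal
  let temp := (getWhole sVal).toList.reverse
  String.ofList (zLoopA temp [] false)

-- ===== PORT B =====
def getWholeZ_alt (sVal : String) : String :=
  let dot : Int := PySem.Str.find sVal "."
  let whole : String := if dot == -1 then sVal else PySem.Str.slice sVal none (some dot)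
  -- whole.rstrip('0') ported by hand: drop '0's from the end — exact for every string
  let stripped : String := String.ofList ((whole.toList.reverse.dropWhile (· == '0')).reverse)
  -- '0' * (len(whole) - len(stripped)); the difference is never negative
  String.ofList (List.replicate ((PySem.Str.len whole) - (PySem.Str.len stripped)).toNat '0')

-- ===== PRECONDITION & SPEC =====
def Spec_getWholeZ (sVal : String) (out : String) : Prop := out = getWholeZ_alt sVal
instance (sVal : String) (out : String) : Decidable (Spec_getWholeZ sVal out) := by unfold Spec_getWholeZ; infer_instance

-- ===== CLAIM (what is proved, stated in full; the proofs are below) =====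
def Claim_equal_getWholeZ : Prop := ∀ (sVal : String), Dom_getWholeZ sVal → Spec_getWholeZ sVal (getWholeZ sVal)

-- ===== LEMMAS AND PROOFS =====

theorem getWholeGo_eq (l : List Char) : getWholeGo l = l.takeWhile (fun c => !(c == '.')) := by
  induction l with
  | nil => rfl
  | cons c cs ih =>
    by_cases h : c = '.' <;> simp [getWholeGo, h, ih]

theorem zLoopA_true (l : List Char) (out : List Char) : zLoopA l out true = out := by
  induction l generalizing out with
  | nil => rfl
  | cons c cs ih => simp [zLoopA, ih]

theorem zLoopA_false (l : List Char) (out : List Char) :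
    zLoopA l out false = out ++ l.takeWhile (· == '0') := by
  induction l generalizing out with
  | nil => simp [zLoopA]
  | cons c cs ih =>
    by_cases h : c = '0'
    · simp [zLoopA, h, ih]
    · simp [zLoopA, h, zLoopA_true]

theorem singleton_prefix_iff {a : Char} {t : List Char} : [a] <+: t ↔ t.head? = some a := by
  cases t with
  | nil => simp
  | cons b bs =>
    constructor
    · rintro ⟨r, hr⟩; simp at hr; simp [hr.1]
    · intro h; simp at h; exact ⟨bs, by simp [h]⟩

theorem takeWhile_eq_take (l : List Char) (k : Nat) (hk : l[k]? = some '.')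
    (hmin : ∀ i, i < k → l[i]? ≠ some '.') :
    l.takeWhile (fun c => !(c == '.')) = l.take k := by
  induction l generalizing k with
  | nil => simp at hk
  | cons c cs ih =>
    cases k with
    | zero => simp_all
    | succ k =>
      have hc : c ≠ '.' := by
        intro h; exact (hmin 0 (Nat.succ_pos _)) (by simp [h])
      rw [List.takeWhile_cons, if_pos (by simp [hc]), List.take_succ_cons]
      rw [ih k (by simpa using hk) (fun i hi => by
        have := hmin (i + 1) (by omega); simpa using this)]

-- B's whole part is A's getWhole
theorem whole_eq (sVal : String) :
    (if (PySem.Str.find sVal "." == -1) then sVal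
     else PySem.Str.slice sVal none (some (PySem.Str.find sVal "."))).toList
      = sVal.toList.takeWhile (fun c => !(c == '.')) := by
  have hfind : PySem.Str.find sVal "." = PySem.Chars.find sVal.toList ['.'] := by
    simp [PySem.Str.find]
  by_cases h : PySem.Chars.find sVal.toList ['.'] = -1
  · rw [if_pos (by simp [h])]
    have hnin : ¬ ['.'] <:+: sVal.toList := (PySem.Chars.find_eq_neg_one_iff _ _).1 h
    have hmem : ∀ c ∈ sVal.toList, c ≠ '.' := by
      intro c hc hcdot
      subst hcdot
      obtain ⟨s, t, hst⟩ := List.mem_iff_append.1 hc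
      exact hnin ⟨s, t, by simp [hst]⟩
    symm
    rw [List.takeWhile_eq_self_iff]
    intro x hx; simpa using hmem x hx
  · rw [if_neg (by simp [h]), hfind]
    set f := PySem.Chars.find sVal.toList ['.'] with hf
    have hnonneg : 0 ≤ f := by
      have := PySem.Chars.neg_one_le_find sVal.toList ['.']
      omega
    have hspec := PySem.Chars.findFrom_natCast_spec sVal.toList ['.'] 0 (Nat.zero_le _)
      (by rw [Nat.cast_zero, PySem.Chars.findFrom_zero]; exact h)
    rw [Nat.cast_zero, PySem.Chars.findFrom_zero, ← hf] at hspec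
    obtain ⟨-, hpre, hmin⟩ := hspec
    rw [PySem.Str.toList_slice, PySem.Chars.slice_eq_listSlice, PySem.List.slice_to _ hnonneg]
    symm
    apply takeWhile_eq_take
    · have := singleton_prefix_iff.1 hpre
      rwa [List.head?_drop] at this
    · intro i hi hsome
      exact hmin i (Nat.zero_le _) hi (singleton_prefix_iff.2 (by rwa [List.head?_drop]))

-- the rstrip/length arithmetic of B computes A's collected trailing zeros
theorem trailing_count (w : List Char) :
    w.reverse.takeWhile (· == '0') =
      List.replicate (((w.length : Int) - (((w.reverse.dropWhile (· == '0')).reverse.length : Int))).toNat) '0' := by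
  have hsplit := List.takeWhile_append_dropWhile (p := (· == '0')) (l := w.reverse)
  have hlen : w.length = (w.reverse.takeWhile (· == '0')).length + (w.reverse.dropWhile (· == '0')).length := by
    have h2 := congrArg List.length hsplit
    rw [List.length_append, List.length_reverse] at h2
    omega
  have hcount : (((w.length : Int) - (((w.reverse.dropWhile (· == '0')).reverse.length : Int))).toNat)
      = (w.reverse.takeWhile (· == '0')).length := by
    simp only [List.length_reverse]
    omega
  rw [hcount, List.eq_replicate_iff]
  exact ⟨rfl, fun b hb => by simpa using List.mem_takeWhile_imp hb⟩

theorem getWholeZ_spec_aux (sVal : String) : getWholeZ sVal = getWholeZ_alt sVal := by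
  show String.ofList (zLoopA (getWhole sVal).toList.reverse [] false) = _
  unfold getWholeZ_alt
  simp only [getWhole, String.toList_ofList, getWholeGo_eq]
  rw [zLoopA_false]
  rw [List.nil_append]
  have hw := whole_eq sVal
  simp only [PySem.Str.len]
  rw [String.toList_ofList, hw]
  set w := sVal.toList.takeWhile (fun c => !(c == '.')) with hwdef
  rw [trailing_count w]

-- ===== VERDICT (by name: the statement is the Claim_ definition above) =====
theorem getWholeZ_spec : Claim_equal_getWholeZ := by
  intro sVal _
  exact getWholeZ_spec_aux sVal
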